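-- pv_equiv track=rewrite | github.com/panshu02/Image-segmentation-using-K-Means | Part_2.py | give_cluster_li
-- ===== SOURCE A (Python) =====
-- def pixel_proxim(vec, mean):
--     val = 0
--     for i in range(len(vec)):
--         val += (vec[i]- mean[i])**2
--
--     return val
--
-- def give_cluster_li(means, color_location_vals):
--     cluster_li = []
--     for i in color_location_vals:
--         proxim_vals = []
--         for j in means:
--             proxim_vals.append(pixel_proxim(i, j))
--         cluster_li.append(proxim_vals.index(min(proxim_vals)))
--
--     return cluster_li
-- ===== SOURCE B (Python) =====
-- def give_cluster_li(means, color_location_vals):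
--     cluster_li = []
--     for vec in color_location_vals:
--         best_i = 0
--         best_d = None
--         idx = 0
--         for m in means:
--             d = 0
--             for a, b in zip(vec, m):
--                 d += (a - b) ** 2
--             if best_d is None or d < best_d:
--                 best_d = d
--                 best_i = idx
--             idx += 1
--         cluster_li.append(best_i)
--     return cluster_li
-- ===== Notes on version B (the rewrite author's own statement) =====
-- stated objective: simpler
-- what changed: Replaces the build-full-distance-list then min()+.index() three-scan pattern (and the helper's index-based squared-distance loop) with a single fused pass per pixel that maintains a running best index and best distance, summing over zip(vec, m) instead of indexing.
import Mathlib
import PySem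

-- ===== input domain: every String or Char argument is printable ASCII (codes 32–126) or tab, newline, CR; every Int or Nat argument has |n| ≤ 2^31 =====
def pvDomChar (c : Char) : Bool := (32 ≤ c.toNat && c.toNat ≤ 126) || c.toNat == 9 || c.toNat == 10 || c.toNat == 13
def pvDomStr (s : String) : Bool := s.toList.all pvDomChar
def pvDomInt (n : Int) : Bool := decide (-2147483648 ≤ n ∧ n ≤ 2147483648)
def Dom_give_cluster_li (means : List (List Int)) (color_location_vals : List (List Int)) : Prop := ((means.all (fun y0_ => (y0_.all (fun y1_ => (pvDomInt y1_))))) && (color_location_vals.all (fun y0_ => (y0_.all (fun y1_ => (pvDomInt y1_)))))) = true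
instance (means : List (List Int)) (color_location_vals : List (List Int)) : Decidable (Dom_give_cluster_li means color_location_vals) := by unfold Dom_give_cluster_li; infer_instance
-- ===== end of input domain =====

-- B fuses A's build-distance-list + min + .index three scans into one running-argmin pass per
-- pixel (simpler; equal asymptotic cost).

-- ===== PORT A =====
def pixel_proxim (vec : List Int) (mean : List Int) : Int :=
  (PySem.List.pyRange 0 vec.length 1).foldl
    (fun val i => val + (PySem.List.pyGetD vec i 0 - PySem.List.pyGetD mean i 0) ^ 2) 0

def give_cluster_li (means : List (List Int)) (color_location_vals : List (List Int)) : List Int :=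
  color_location_vals.foldl
    (fun cluster_li i =>
      let proxim_vals := means.foldl (fun pv j => pv ++ [pixel_proxim i j]) []
      cluster_li ++
        [(((PySem.List.index? proxim_vals ((PySem.List.min? proxim_vals (fun x => x)).getD 0)).getD 0 : Nat) : Int)])
    []

-- ===== PORT B =====
-- innermost loop of Source B: d = Σ (a-b)^2 over zip(vec, m)
def zipDist (vec : List Int) (m : List Int) : Int :=
  (vec.zip m).foldl (fun d p => d + (p.1 - p.2) ^ 2) 0

-- the 'for m in means' loop of Source B with state (idx, best_i, best_d)
def bestLoop (vec : List Int) (means : List (List Int)) (idx : Int) (bi : Int) (bd : Option Int) : Int :=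
  match means with
  | [] => bi
  | m :: rest =>
    let d := zipDist vec m
    match bd with
    | none => bestLoop vec rest (idx + 1) idx (some d)
    | some b =>
      if d < b then bestLoop vec rest (idx + 1) idx (some d)
      else bestLoop vec rest (idx + 1) bi (some b)

def give_cluster_li_alt (means : List (List Int)) (color_location_vals : List (List Int)) : List Int :=
  color_location_vals.foldl (fun cluster_li vec => cluster_li ++ [bestLoop vec means 0 0 none]) []

-- ===== PRECONDITION & SPEC =====
-- A raises (ValueError from min([]) when means is empty, IndexError in pixel_proxim when some
-- mean is shorter than some pixel) exactly outside this condition; it returns normally inside it.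
def Pre_give_cluster_li (means : List (List Int)) (color_location_vals : List (List Int)) : Prop :=
  color_location_vals = [] ∨
    (means ≠ [] ∧ ∀ v ∈ color_location_vals, ∀ m ∈ means, v.length ≤ m.length)

instance (means : List (List Int)) (color_location_vals : List (List Int)) : Decidable (Pre_give_cluster_li means color_location_vals) := by unfold Pre_give_cluster_li; infer_instance

def pvWitness_give_cluster_li : List (List Int) × List (List Int) := ([[0, 0, 3]], [[1, 2, 3], [0, 0, 0]])

def Spec_give_cluster_li (means : List (List Int)) (color_location_vals : List (List Int)) (out : List Int) : Prop := out = give_cluster_li_alt means color_location_vals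
instance (means : List (List Int)) (color_location_vals : List (List Int)) (out : List Int) : Decidable (Spec_give_cluster_li means color_location_vals out) := by unfold Spec_give_cluster_li; infer_instance

-- ===== CLAIM (what is proved, stated in full; the proofs are below) =====
def Claim_equal_give_cluster_li : Prop := ∀ (means : List (List Int)) (color_location_vals : List (List Int)), Dom_give_cluster_li means color_location_vals → Pre_give_cluster_li means color_location_vals → Spec_give_cluster_li means color_location_vals (give_cluster_li means color_location_vals)


-- ===== LEMMAS AND PROOFS =====

-- A's index-based squared-distance loop equals B's zip-based one when the mean is long enough
lemma range_foldl_eq_zip (vec mean : List Int) (acc : Int) (h : vec.length ≤ mean.length) :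
    (List.range vec.length).foldl (fun val k => val + (vec.getD k 0 - mean.getD k 0) ^ 2) acc
      = (vec.zip mean).foldl (fun d p => d + (p.1 - p.2) ^ 2) acc := by
  induction vec generalizing mean acc with
  | nil => simp
  | cons a vt ih =>
    match mean with
    | [] => simp at h
    | b :: mt =>
      simp only [List.length_cons, List.range_succ_eq_map, List.foldl_cons, List.foldl_map,
        List.getD_cons_zero, List.getD_cons_succ, List.zip_cons_cons, Nat.succ_eq_add_one]
      exact ih mt _ (by simpa using h)

lemma pixel_proxim_eq_zipDist (vec mean : List Int) (h : vec.length ≤ mean.length) :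
    pixel_proxim vec mean = zipDist vec mean := by
  unfold pixel_proxim zipDist
  rw [PySem.List.pyRange_one]
  simp only [Int.sub_zero, Int.toNat_natCast, List.foldl_map, Int.zero_add,
    PySem.List.pyGetD_natCast]
  exact range_foldl_eq_zip vec mean 0 h

-- B's per-pixel loop on the precomputed distance list
def argLoop : List Int → Int → Int → Option Int → Int
  | [], _, bi, _ => bi
  | d :: rest, k, bi, bd =>
    match bd with
    | none => argLoop rest (k + 1) k (some d)
    | some b =>
      if d < b then argLoop rest (k + 1) k (some d) else argLoop rest (k + 1) bi (some b)

lemma bestLoop_eq_argLoop (vec : List Int) (means : List (List Int)) :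
    ∀ (idx bi : Int) (bd : Option Int),
      bestLoop vec means idx bi bd = argLoop (means.map (zipDist vec)) idx bi bd := by
  induction means with
  | nil => intro idx bi bd; rfl
  | cons m rest ih =>
    intro idx bi bd
    cases bd with
    | none => simpa [bestLoop, argLoop] using ih (idx + 1) idx (some (zipDist vec m))
    | some b =>
      by_cases hd : zipDist vec m < b <;>
        simp [bestLoop, argLoop, hd, ih]

lemma argLoop_some (ds : List Int) : ∀ (k bi b : Int),
    argLoop ds k bi (some b) =
      if ds.foldl min b < b then k + (((PySem.List.index? ds (ds.foldl min b)).getD 0 : Nat) : Int) else bi := by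
  induction ds with
  | nil => intro k bi b; simp [argLoop]
  | cons d rest ih =>
    intro k bi b
    simp only [argLoop, List.foldl_cons]
    by_cases hd : d < b
    · rw [if_pos hd, ih (k + 1) k d, min_eq_right (le_of_lt hd)]
      have hle : rest.foldl min d ≤ d := (PySem.List.foldl_min_le rest d).1
      rw [if_pos (lt_of_le_of_lt hle hd)]
      by_cases h2 : rest.foldl min d < d
      · rw [if_pos h2]
        have hmem : rest.foldl min d ∈ rest := by
          rcases PySem.List.foldl_min_mem rest d with h | h
          · omega
          · exact h
        obtain ⟨j, hj⟩ := Option.isSome_iff_exists.1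
          ((PySem.List.index?_isSome_iff rest (rest.foldl min d)).2 hmem)
        rw [PySem.List.index?_cons_of_ne rest (by omega : d ≠ rest.foldl min d), hj]
        simp only [Option.map_some, Option.getD_some]
        push_cast
        ring
      · rw [if_neg h2]
        have heq : rest.foldl min d = d := le_antisymm hle (by omega)
        rw [heq, PySem.List.index?_cons_self]
        simp
    · rw [if_neg hd, min_eq_left (by omega : b ≤ d), ih (k + 1) bi b]
      by_cases h2 : rest.foldl min b < b
      · rw [if_pos h2, if_pos h2]
        have hmem : rest.foldl min b ∈ rest := by
          rcases PySem.List.foldl_min_mem rest b with h | h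
          · omega
          · exact h
        obtain ⟨j, hj⟩ := Option.isSome_iff_exists.1
          ((PySem.List.index?_isSome_iff rest (rest.foldl min b)).2 hmem)
        rw [PySem.List.index?_cons_of_ne rest (by omega : d ≠ rest.foldl min b), hj]
        simp only [Option.map_some, Option.getD_some]
        push_cast
        ring
      · rw [if_neg h2, if_neg h2]

lemma perPixel (d : Int) (rest : List Int) :
    (((PySem.List.index? (d :: rest) ((PySem.List.min? (d :: rest) (fun x => x)).getD 0)).getD 0 : Nat) : Int)
      = argLoop (d :: rest) 0 0 none := by
  have hB : argLoop (d :: rest) 0 0 none = argLoop rest 1 0 (some d) := rfl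
  rw [hB, argLoop_some rest 1 0 d, PySem.List.min?_id_cons]
  simp only [Option.getD_some]
  by_cases h2 : rest.foldl min d < d
  · rw [if_pos h2]
    have hmem : rest.foldl min d ∈ rest := by
      rcases PySem.List.foldl_min_mem rest d with h | h
      · omega
      · exact h
    obtain ⟨j, hj⟩ := Option.isSome_iff_exists.1
      ((PySem.List.index?_isSome_iff rest (rest.foldl min d)).2 hmem)
    rw [PySem.List.index?_cons_of_ne rest (by omega : d ≠ rest.foldl min d), hj]
    simp only [Option.map_some, Option.getD_some]
    push_cast
    ring
  · rw [if_neg h2]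
    have heq : rest.foldl min d = d :=
      le_antisymm (PySem.List.foldl_min_le rest d).1 (by omega)
    rw [heq, PySem.List.index?_cons_self]
    simp

lemma inner_fold_eq_map (vec : List Int) (means : List (List Int)) :
    means.foldl (fun pv j => pv ++ [pixel_proxim vec j]) [] = means.map (pixel_proxim vec) := by
  simpa using PySem.List.foldl_append_singleton_eq_map (pixel_proxim vec) means []

-- ===== VERDICT (by name: the statement is the Claim_ definition above) =====
theorem give_cluster_li_spec : Claim_equal_give_cluster_li := by
  intro means cvals _ hpre
  unfold Spec_give_cluster_li give_cluster_li give_cluster_li_alt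
  rcases hpre with hnil | ⟨hm, hlen⟩
  · subst hnil; rfl
  · rw [PySem.List.foldl_append_singleton_eq_map, PySem.List.foldl_append_singleton_eq_map]
    apply List.map_congr_left
    intro vec hvec
    rw [inner_fold_eq_map]
    have hmap : means.map (pixel_proxim vec) = means.map (zipDist vec) := by
      apply List.map_congr_left
      intro m hmm
      exact pixel_proxim_eq_zipDist vec m (hlen vec hvec m hmm)
    rw [hmap, bestLoop_eq_argLoop vec means 0 0 none]
    cases hms : means.map (zipDist vec) with
    | nil => exact absurd (List.map_eq_nil_iff.1 hms) hm
    | cons d rest => exact perPixel d rest
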